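-- pv_equiv track=rewrite | github.com/NicoKNL/coding-problems | problems/advent-of-code/2022/11/sol2.py | splitPerMonkey
-- ===== SOURCE A (Python) =====
-- def splitPerMonkey(lines):
--     data = []
--     monkey = []
--
--     for line in lines:
--         if not line:
--             data.append(monkey[1:])
--             monkey = []
--         else:
--             monkey.append(line.split(":")[-1].strip())
--
--     if monkey:
--         data.append(monkey[1:])
--
--     return data
-- ===== SOURCE B (Python) =====
-- def splitPerMonkey(lines):
--     # Recursive divide-and-conquer: split at the first empty line and recurse.
--     if "" in lines:
--         i = lines.index("")
--         return [[l.split(":")[-1].strip() for l in lines[1:i]]] + splitPerMonkey(lines[i + 1:])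
--     if not lines:
--         return []
--     return [[l.split(":")[-1].strip() for l in lines[1:]]]
-- ===== Notes on version B (the rewrite author's own statement) =====
-- stated objective: alternative
-- what changed: B is a recursive divide-at-first-delimiter: it finds the first empty line with list.index, emits that segment's processed tail via a slice, and recurses on the remainder, instead of A's single imperative pass with a (data, monkey) accumulator.
import Mathlib
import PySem

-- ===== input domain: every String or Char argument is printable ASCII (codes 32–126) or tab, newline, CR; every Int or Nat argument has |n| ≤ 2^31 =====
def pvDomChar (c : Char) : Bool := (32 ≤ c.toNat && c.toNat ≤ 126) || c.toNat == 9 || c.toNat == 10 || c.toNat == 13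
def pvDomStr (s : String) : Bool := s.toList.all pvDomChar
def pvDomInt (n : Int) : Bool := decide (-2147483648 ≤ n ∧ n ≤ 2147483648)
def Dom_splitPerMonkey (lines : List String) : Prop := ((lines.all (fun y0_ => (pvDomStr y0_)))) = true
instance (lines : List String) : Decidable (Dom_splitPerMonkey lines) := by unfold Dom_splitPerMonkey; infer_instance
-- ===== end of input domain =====

-- B replaces A's single accumulator pass by a recursive divide-at-first-delimiter split; same
-- result, different decomposition (not claimed faster).

-- ===== PORT A =====
-- line.split(":")[-1].strip()  (split with ":" is never empty, so [-1] never raises)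
def pvProc (line : String) : String :=
  PySem.Str.strip ((PySem.List.pyGet? ((PySem.Str.split? line ":").getD []) (-1)).getD "")

-- loop body of A: state = (data, monkey)
def pvStepA (st : List (List String) × List String) (line : String) :
    List (List String) × List String :=
  if line = "" then (st.1 ++ [st.2.drop 1], ([] : List String))
  else (st.1, st.2 ++ [pvProc line])

def splitPerMonkey (lines : List String) : List (List String) :=
  let st := lines.foldl pvStepA (([] : List (List String)), ([] : List String))
  if st.2 ≠ [] then st.1 ++ [st.2.drop 1] else st.1

-- ===== PORT B =====
-- '"" in lines' + 'lines.index("")' ported together as a match on PySem.List.index?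
-- (some i ↔ membership, i = first index); slices are PySem.List.slice.
def splitPerMonkey_alt (lines : List String) : List (List String) :=
  match h : PySem.List.index? lines "" with
  | some i =>
      [(PySem.List.slice lines (some 1) (some (i : Int))).map pvProc] ++
        splitPerMonkey_alt (PySem.List.slice lines (some ((i : Int) + 1)) none)
  | none =>
      if lines = [] then [] else [(PySem.List.slice lines (some 1) none).map pvProc]
termination_by lines.length
decreasing_by
  have hmem : ("" : String) ∈ lines := (PySem.List.index?_isSome_iff lines "").1 (by rw [h]; rfl)
  have : ((i : Int) + 1) = (((i + 1 : Nat)) : Int) := by push_cast; ring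
  rw [this, PySem.List.slice_from_natCast]
  have hlen : 0 < lines.length := List.length_pos_of_mem hmem
  simp [List.length_drop]
  omega

-- ===== PRECONDITION & SPEC =====
def Spec_splitPerMonkey (lines : List String) (out : List (List String)) : Prop := out = splitPerMonkey_alt lines
instance (lines : List String) (out : List (List String)) : Decidable (Spec_splitPerMonkey lines out) := by unfold Spec_splitPerMonkey; infer_instance

-- ===== CLAIM (what is proved, stated in full; the proofs are below) =====
def Claim_equal_splitPerMonkey : Prop := ∀ (lines : List String), Dom_splitPerMonkey lines → Spec_splitPerMonkey lines (splitPerMonkey lines)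

-- ===== LEMMAS AND PROOFS =====

/-- Unfold B at a first-delimiter index. -/
lemma pv_alt_some (lines : List String) (i : Nat)
    (h : PySem.List.index? lines "" = some i) :
    splitPerMonkey_alt lines =
      [(PySem.List.slice lines (some 1) (some (i : Int))).map pvProc] ++
        splitPerMonkey_alt (PySem.List.slice lines (some ((i : Int) + 1)) none) := by
  rw [splitPerMonkey_alt]
  split
  · next i' h' => rw [h'] at h; injection h with h; subst h; rfl
  · next h' => rw [h'] at h; cases h

/-- Unfold B when no delimiter occurs. -/
lemma pv_alt_none (lines : List String)
    (h : PySem.List.index? lines "" = none) :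
    splitPerMonkey_alt lines =
      if lines = [] then [] else [(PySem.List.slice lines (some 1) none).map pvProc] := by
  rw [splitPerMonkey_alt]
  split
  · next i' h' => rw [h'] at h; cases h
  · next h' => rfl

/-- A's loop over a delimiter-free segment only extends the monkey buffer. -/
lemma pv_fold_noempty (seg : List String) : ∀ (data : List (List String)) (monkey : List String),
    ("" : String) ∉ seg →
    seg.foldl pvStepA (data, monkey) = (data, monkey ++ seg.map pvProc) := by
  induction seg with
  | nil => simp
  | cons s t ih =>
    intro data monkey hne
    have hs : s ≠ "" := fun h => hne (h ▸ List.mem_cons_self)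
    have ht : ("" : String) ∉ t := fun h => hne (List.mem_cons_of_mem _ h)
    simp [pvStepA, hs, ih _ _ ht]

/-- Main correspondence: finishing A's loop from state (data, []) yields data ++ B's result. -/
lemma pv_main : ∀ (n : Nat) (lines : List String) (data : List (List String)),
    lines.length ≤ n →
    (let st := lines.foldl pvStepA (data, []);
     if st.2 ≠ [] then st.1 ++ [st.2.drop 1] else st.1) = data ++ splitPerMonkey_alt lines := by
  intro n
  induction n with
  | zero =>
    intro lines data hlen
    have : lines = [] := List.eq_nil_of_length_eq_zero (Nat.le_zero.mp hlen)
    subst this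
    simp [pv_alt_none [] rfl]
  | succ n ih =>
    intro lines data hlen
    match h : PySem.List.index? lines "" with
    | some i =>
      obtain ⟨pre, suf, hsplit, hprelen, hnpre⟩ := (PySem.List.index?_eq_some_iff lines "" i).1 h
      subst hsplit
      rw [pv_alt_some _ _ h]
      have hcast : ((i : Int) + 1) = (((i + 1 : Nat)) : Int) := by push_cast; ring
      have hdrop : PySem.List.slice (pre ++ "" :: suf) (some ((i : Int) + 1)) none = suf := by
        rw [hcast, PySem.List.slice_from_natCast, ← hprelen]
        simp [List.drop_append]
      have hseg : PySem.List.slice (pre ++ "" :: suf) (some 1) (some (i : Int)) = pre.drop 1 := by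
        rw [show (1 : Int) = ((1 : Nat) : Int) by norm_num, PySem.List.slice_natCast, ← hprelen]
        cases pre with
        | nil => simp
        | cons p ps => simp
      rw [hdrop, hseg]
      rw [List.foldl_append, pv_fold_noempty pre data [] hnpre]
      simp only [List.foldl_cons, List.nil_append]
      have hstep : pvStepA (data, pre.map pvProc) "" =
          (data ++ [(pre.map pvProc).drop 1], []) := by simp [pvStepA]
      rw [hstep]
      have hsuflen : suf.length ≤ n := by
        simp only [List.length_append, List.length_cons] at hlen; omega
      rw [ih suf (data ++ [(pre.map pvProc).drop 1]) hsuflen]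
      simp
    | none =>
      have hnmem : ("" : String) ∉ lines := (PySem.List.index?_eq_none_iff lines "").1 h
      rw [pv_alt_none _ h, pv_fold_noempty lines data [] hnmem]
      cases hl : lines with
      | nil => simp
      | cons x xs =>
        have hx : x ≠ "" := fun hx => hnmem (hl ▸ hx ▸ List.mem_cons_self)
        subst hl
        simp [PySem.List.slice_from_one]

-- ===== VERDICT (by name: the statement is the Claim_ definition above) =====
theorem splitPerMonkey_spec : Claim_equal_splitPerMonkey := by
  intro lines _
  unfold Spec_splitPerMonkey splitPerMonkey
  simpa using pv_main lines.length lines [] le_rfl
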